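-- pv_equiv track=rewrite | github.com/goodboydan/DMESM | CVE/data_processing.py | cal_matrix
-- ===== SOURCE A (Python) =====
-- def compare(os1, os2):
--     inter = set(os1).intersection(set(os2))
--     return len(inter)
--
-- def cal_matrix(lists_list):
--     mat = []
--     for i in range(len(lists_list)):
--         mat_line = []
--         os_1 = lists_list[i]
--         for j in range(len(lists_list)):
--             os_2 = lists_list[j]
--             mat_line.append(compare(os_1, os_2))
--         mat.append(mat_line)
--     return mat
-- ===== SOURCE B (Python) =====
-- def cal_matrix(lists_list):
--     n = len(lists_list)
--     sets = [set(l) for l in lists_list]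
--     # distinct elements across all lists, in first-appearance order
--     universe = []
--     seen = set()
--     for l in lists_list:
--         for x in l:
--             if x not in seen:
--                 seen.add(x)
--                 universe.append(x)
--     mat = [[0] * n for _ in range(n)]
--     for x in universe:
--         occ = [i for i in range(n) if x in sets[i]]
--         for i in occ:
--             row = mat[i]
--             for j in occ:
--                 row[j] += 1
--     return mat
-- ===== Notes on version B (the rewrite author's own statement) =====
-- stated objective: faster
-- what changed: Replaced the pairwise set-intersection double loop (which rebuilds both sets for every cell) by an element-centric inverted-index accumulation: each list is deduplicated once, and each distinct element's posting list of containing lists increments every (i,j) cell once.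
import Mathlib
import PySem

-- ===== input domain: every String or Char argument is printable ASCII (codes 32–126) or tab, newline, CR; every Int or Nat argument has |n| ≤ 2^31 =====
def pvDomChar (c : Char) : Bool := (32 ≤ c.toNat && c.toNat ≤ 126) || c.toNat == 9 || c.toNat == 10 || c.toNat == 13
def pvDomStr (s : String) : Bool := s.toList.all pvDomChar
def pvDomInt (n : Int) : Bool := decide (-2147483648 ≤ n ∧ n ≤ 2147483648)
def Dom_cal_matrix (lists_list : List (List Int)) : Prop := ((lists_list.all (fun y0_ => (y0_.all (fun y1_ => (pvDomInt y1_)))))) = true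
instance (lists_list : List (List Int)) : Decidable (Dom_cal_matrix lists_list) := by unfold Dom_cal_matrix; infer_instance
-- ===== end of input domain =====

-- B replaces A's per-cell pairwise set intersection by a one-pass inverted-index accumulation
-- over the distinct elements (an alternative algorithm; same return value, proved below).

-- ===== PORT A =====
-- A's helper 'compare': len(set(os1).intersection(set(os2)))
def pvCompare (os1 os2 : List Int) : Int :=
  PySem.Set.len (PySem.Set.inter (PySem.Set.ofList os1) (PySem.Set.ofList os2))

def cal_matrix (lists_list : List (List Int)) : List (List Int) :=
  (PySem.List.pyRange 0 (lists_list.length : Int) 1).foldl (fun mat i =>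
    let os_1 := PySem.List.pyGetD lists_list i []
    mat ++ [(PySem.List.pyRange 0 (lists_list.length : Int) 1).foldl (fun mat_line j =>
      mat_line ++ [pvCompare os_1 (PySem.List.pyGetD lists_list j [])]) []]) []

-- ===== PORT B =====
-- Source B's 'row[j] += 1' on row mat[i] (rows of mat are independent fresh lists in Source B)
def pvBump (mat : List (List Int)) (i j : Nat) : List (List Int) :=
  let row := mat.getD i []
  mat.set i (row.set j (row.getD j 0 + 1))

def cal_matrix_alt (lists_list : List (List Int)) : List (List Int) :=
  let n := lists_list.length
  let sets := lists_list.map (fun l => PySem.Set.ofList l)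
  -- the seen/universe loop of Source B: distinct elements in first-appearance order
  let univ : PySem.Set Int :=
    lists_list.foldl (fun u l => l.foldl PySem.Set.add u) PySem.Set.empty
  let mat0 := List.replicate n (List.replicate n (0 : Int))
  univ.foldl (fun mat x =>
    let occ := (List.range n).filter (fun i => PySem.Set.contains (sets.getD i []) x)
    occ.foldl (fun mat i => occ.foldl (fun mat j => pvBump mat i j) mat) mat) mat0

-- ===== PRECONDITION & SPEC =====
def Spec_cal_matrix (lists_list : List (List Int)) (out : List (List Int)) : Prop := out = cal_matrix_alt lists_list
instance (lists_list : List (List Int)) (out : List (List Int)) : Decidable (Spec_cal_matrix lists_list out) := by unfold Spec_cal_matrix; infer_instance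

-- ===== CLAIM (what is proved, stated in full; the proofs are below) =====
def Claim_equal_cal_matrix : Prop := ∀ (lists_list : List (List Int)), Dom_cal_matrix lists_list → Spec_cal_matrix lists_list (cal_matrix lists_list)

-- ===== LEMMAS AND PROOFS =====

-- the common spec matrix: entry (a,b) is compare(lists_list[a], lists_list[b])
def pvM (ls : List (List Int)) : List (List Int) :=
  (List.range ls.length).map (fun a => (List.range ls.length).map (fun b =>
    pvCompare (ls.getD a []) (ls.getD b [])))

theorem pvFlatten_map_singleton {α β : Type} (f : α → β) (l : List α) :
    (List.map (fun x => [f x]) l).flatten = List.map f l := by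
  induction l <;> simp_all

theorem cal_matrix_eq_pvM (ls : List (List Int)) : cal_matrix ls = pvM ls := by
  simp [cal_matrix, pvM, PySem.List.pyRange_zero_nat, List.map_map, Function.comp_def,
    PySem.List.pyGetD_natCast, pvFlatten_map_singleton]

def pvShape (n : Nat) (mat : List (List Int)) : Prop :=
  mat.length = n ∧ ∀ row ∈ mat, row.length = n

def pvGetE (mat : List (List Int)) (a b : Nat) : Int := (mat.getD a []).getD b 0

theorem pvGetD_set {α : Type} (l : List α) (i j : Nat) (v d : α) :
    (l.set i v).getD j d = if i = j ∧ i < l.length then v else l.getD j d := by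
  simp [List.getD, List.getElem?_set]
  split <;> rename_i h1
  · subst h1; split <;> simp_all
  · simp [h1]

theorem pvRow_len {n : Nat} {mat : List (List Int)} (h : pvShape n mat) {k : Nat} (hk : k < n) :
    (mat.getD k []).length = n := by
  rw [List.getD_eq_getElem _ _ (h.1 ▸ hk)]
  exact h.2 _ (List.getElem_mem _)

theorem pvShape_bump {n : Nat} {mat : List (List Int)} (h : pvShape n mat) {i : Nat}
    (hi : i < n) (j : Nat) : pvShape n (pvBump mat i j) := by
  refine ⟨by simp [pvBump, h.1], ?_⟩
  intro row hrow
  rcases List.mem_or_eq_of_mem_set hrow with h1 | h1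
  · exact h.2 _ h1
  · rw [h1, List.length_set]; exact pvRow_len h hi

theorem pvGetE_bump {n : Nat} {mat : List (List Int)} (h : pvShape n mat) {i j a b : Nat}
    (hi : i < n) (hj : j < n) (ha : a < n) (hb : b < n) :
    pvGetE (pvBump mat i j) a b = pvGetE mat a b + (if a = i ∧ b = j then 1 else 0) := by
  have hri := pvRow_len h hi
  have hlen := h.1
  unfold pvGetE pvBump
  rw [pvGetD_set]
  by_cases hia : i = a
  · subst hia
    rw [if_pos ⟨rfl, by omega⟩, pvGetD_set]
    by_cases hjb : j = b
    · subst hjb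
      rw [if_pos ⟨rfl, by omega⟩, if_pos ⟨rfl, rfl⟩]
    · rw [if_neg (fun hc => hjb hc.1), if_neg (fun hc => hjb hc.2.symm)]
      simp
  · rw [if_neg (fun hc => hia hc.1), if_neg (fun hc => hia hc.1.symm)]
    simp

theorem pv_inner {n : Nat} (js : List Nat) (hjs : ∀ j ∈ js, j < n) {i : Nat} (hi : i < n)
    {mat : List (List Int)} (h : pvShape n mat) {a b : Nat} (ha : a < n) (hb : b < n) :
    pvShape n (js.foldl (fun m j => pvBump m i j) mat) ∧
    pvGetE (js.foldl (fun m j => pvBump m i j) mat) a b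
      = pvGetE mat a b + (if a = i then (js.count b : Int) else 0) := by
  induction js generalizing mat with
  | nil => simp [h]
  | cons j js ih =>
    have hj : j < n := hjs j (by simp)
    have hs := pvShape_bump h hi j
    obtain ⟨hsh, hval⟩ := ih (fun j' hj' => hjs j' (by simp [hj'])) hs
    refine ⟨hsh, ?_⟩
    rw [List.foldl_cons, hval, pvGetE_bump h hi hj ha hb]
    by_cases hai : a = i <;> by_cases hbj : b = j <;>
      simp [hai, hbj, List.count_cons] <;> omega

theorem pv_outer {n : Nat} (is : List Nat) (js : List Nat) (his : ∀ i ∈ is, i < n)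
    (hjs : ∀ j ∈ js, j < n)
    {mat : List (List Int)} (h : pvShape n mat) {a b : Nat} (ha : a < n) (hb : b < n) :
    pvShape n (is.foldl (fun m i => js.foldl (fun m' j => pvBump m' i j) m) mat) ∧
    pvGetE (is.foldl (fun m i => js.foldl (fun m' j => pvBump m' i j) m) mat) a b
      = pvGetE mat a b + (is.count a : Int) * (js.count b : Int) := by
  induction is generalizing mat with
  | nil => simp [h]
  | cons i is ih =>
    have hi : i < n := his i (by simp)
    obtain ⟨hs1, hv1⟩ := pv_inner js hjs hi h ha hb
    obtain ⟨hsh, hval⟩ := ih (fun i' hi' => his i' (by simp [hi'])) hs1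
    refine ⟨hsh, ?_⟩
    rw [List.foldl_cons, hval, hv1]
    by_cases hai : a = i
    · subst hai; simp; ring
    · have hia : ¬ i = a := fun h' => hai h'.symm
      simp [hai, hia]

def pvSets (ls : List (List Int)) : List (PySem.Set Int) := ls.map (fun l => PySem.Set.ofList l)

def pvIn (ls : List (List Int)) (i : Nat) (x : Int) : Bool :=
  PySem.Set.contains ((pvSets ls).getD i []) x

def pvOcc (ls : List (List Int)) (x : Int) : List Nat :=
  (List.range ls.length).filter (fun i => pvIn ls i x)

def pvStep (ls : List (List Int)) (mat : List (List Int)) (x : Int) : List (List Int) :=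
  (pvOcc ls x).foldl (fun mat i => (pvOcc ls x).foldl (fun mat j => pvBump mat i j) mat) mat

theorem pvOcc_mem (ls : List (List Int)) (x : Int) (k : Nat) :
    k ∈ pvOcc ls x ↔ k < ls.length ∧ pvIn ls k x = true := by
  simp [pvOcc, List.mem_filter, List.mem_range]

theorem pvOcc_count (ls : List (List Int)) (x : Int) (k : Nat) (hk : k < ls.length) :
    (pvOcc ls x).count k = if pvIn ls k x then 1 else 0 := by
  by_cases h : pvIn ls k x
  · rw [if_pos h]
    exact List.count_eq_one_of_mem ((List.nodup_range).filter _) ((pvOcc_mem ls x k).2 ⟨hk, h⟩)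
  · rw [if_neg h, List.count_eq_zero]
    intro hm
    exact h ((pvOcc_mem ls x k).1 hm).2

theorem pvGetE_step (ls : List (List Int)) {mat : List (List Int)}
    (h : pvShape ls.length mat) (x : Int) {a b : Nat} (ha : a < ls.length) (hb : b < ls.length) :
    pvShape ls.length (pvStep ls mat x) ∧
    pvGetE (pvStep ls mat x) a b
      = pvGetE mat a b + (if pvIn ls a x && pvIn ls b x then 1 else 0) := by
  have hbnd : ∀ k ∈ pvOcc ls x, k < ls.length := fun k hk => ((pvOcc_mem ls x k).1 hk).1
  obtain ⟨hsh, hval⟩ := pv_outer (n := ls.length) (pvOcc ls x) (pvOcc ls x) hbnd hbnd h ha hb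
  refine ⟨hsh, ?_⟩
  rw [pvStep, hval, pvOcc_count ls x a ha, pvOcc_count ls x b hb]
  by_cases h1 : pvIn ls a x <;> by_cases h2 : pvIn ls b x <;> simp [h1, h2]

theorem pv_univ (ls : List (List Int)) (u : List Int) {mat : List (List Int)}
    (h : pvShape ls.length mat) {a b : Nat} (ha : a < ls.length) (hb : b < ls.length) :
    pvShape ls.length (u.foldl (pvStep ls) mat) ∧
    pvGetE (u.foldl (pvStep ls) mat) a b
      = pvGetE mat a b + (u.countP (fun x => pvIn ls a x && pvIn ls b x) : Int) := by
  induction u generalizing mat with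
  | nil => simp [h]
  | cons x u ih =>
    obtain ⟨hs1, hv1⟩ := pvGetE_step ls h x ha hb
    obtain ⟨hsh, hval⟩ := ih hs1
    refine ⟨hsh, ?_⟩
    rw [List.foldl_cons, hval, hv1, List.countP_cons]
    by_cases hx : pvIn ls a x && pvIn ls b x <;> simp [hx]
    ring

theorem pvShape_inner' {n : Nat} (js : List Nat) {i : Nat} (hi : i < n)
    {mat : List (List Int)} (h : pvShape n mat) :
    pvShape n (js.foldl (fun m j => pvBump m i j) mat) := by
  induction js generalizing mat with
  | nil => exact h
  | cons j js ih => exact ih (pvShape_bump h hi j)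

theorem pvShape_outer' {n : Nat} (is : List Nat) (js : List Nat) (his : ∀ i ∈ is, i < n)
    {mat : List (List Int)} (h : pvShape n mat) :
    pvShape n (is.foldl (fun m i => js.foldl (fun m' j => pvBump m' i j) m) mat) := by
  induction is generalizing mat with
  | nil => exact h
  | cons i is ih =>
    exact ih (fun i' hi' => his i' (by simp [hi']))
      (pvShape_inner' js (his i (by simp)) h)

theorem pvShape_univ (ls : List (List Int)) (u : List Int) {mat : List (List Int)}
    (h : pvShape ls.length mat) : pvShape ls.length (u.foldl (pvStep ls) mat) := by
  induction u generalizing mat with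
  | nil => exact h
  | cons x u ih =>
    exact ih (pvShape_outer' _ _ (fun k hk => ((pvOcc_mem ls x k).1 hk).1) h)

theorem pv_count (ls : List (List Int)) {a b : Nat} (ha : a < ls.length) (hb : b < ls.length) :
    ((List.countP (fun x => pvIn ls a x && pvIn ls b x) (PySem.Set.ofList ls.flatten) : Nat) : Int)
      = pvCompare (ls.getD a []) (ls.getD b []) := by
  have hga : ls.getD a [] = ls[a] := List.getD_eq_getElem ls [] ha
  have hgb : ls.getD b [] = ls[b] := List.getD_eq_getElem ls [] hb
  have hSa : (pvSets ls).getD a [] = PySem.Set.ofList (ls.getD a []) := by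
    rw [pvSets, List.getD_eq_getElem _ _ (by simpa using ha), List.getElem_map, hga]
  have hSb : (pvSets ls).getD b [] = PySem.Set.ofList (ls.getD b []) := by
    rw [pvSets, List.getD_eq_getElem _ _ (by simpa using hb), List.getElem_map, hgb]
  have hsub : ∀ x : Int, x ∈ PySem.Set.ofList (ls.getD a []) → x ∈ ls.flatten := by
    intro x hx
    rw [PySem.Set.mem_ofList] at hx
    exact List.mem_flatten.2 ⟨ls.getD a [], by rw [hga]; exact List.getElem_mem ha, hx⟩
  rw [pvCompare, PySem.Set.len, PySem.Set.inter]
  congr 1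
  rw [List.countP_eq_length_filter]
  apply List.Perm.length_eq
  rw [List.perm_ext_iff_of_nodup ((PySem.Set.nodup_ofList _).filter _)
      ((PySem.Set.nodup_ofList _).filter _)]
  intro x
  simp only [List.mem_filter, pvIn, hSa, hSb, PySem.Set.contains_iff, Bool.and_eq_true]
  constructor
  · rintro ⟨-, h1, h2⟩; exact ⟨h1, h2⟩
  · rintro ⟨h1, h2⟩; exact ⟨(PySem.Set.mem_ofList _ _).2 (hsub x h1), h1, h2⟩

theorem pvAlt_eq_fold (ls : List (List Int)) :
    cal_matrix_alt ls = (PySem.Set.ofList ls.flatten).foldl (pvStep ls)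
      (List.replicate ls.length (List.replicate ls.length (0:Int))) := by
  have h : ls.foldl (fun u l => l.foldl PySem.Set.add u) PySem.Set.empty
      = PySem.Set.ofList ls.flatten := by
    rw [PySem.Set.ofList, List.foldl_flatten]
  simp only [cal_matrix_alt]
  rw [h]
  rfl

theorem cal_matrix_alt_eq_pvM (ls : List (List Int)) : cal_matrix_alt ls = pvM ls := by
  have h0 : pvShape ls.length (List.replicate ls.length (List.replicate ls.length (0:Int))) :=
    ⟨by simp, fun r hr => by rw [List.eq_of_mem_replicate hr]; simp⟩
  rw [pvAlt_eq_fold]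
  have hs : pvShape ls.length ((PySem.Set.ofList ls.flatten).foldl (pvStep ls)
      (List.replicate ls.length (List.replicate ls.length (0:Int)))) :=
    pvShape_univ ls _ h0
  apply List.ext_getElem
  · rw [hs.1]; simp [pvM]
  · intro a h1 h2
    have ha : a < ls.length := hs.1 ▸ h1
    apply List.ext_getElem
    · rw [hs.2 _ (List.getElem_mem h1)]
      simp [pvM, List.getElem_map, ha]
    · intro b hb1 hb2
      have hb : b < ls.length := by
        have := hs.2 _ (List.getElem_mem h1); omega
      have e1 : (List.foldl (pvStep ls) (List.replicate ls.length (List.replicate ls.length 0))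
          (PySem.Set.ofList ls.flatten))[a][b]
          = pvGetE (List.foldl (pvStep ls) (List.replicate ls.length (List.replicate ls.length 0))
          (PySem.Set.ofList ls.flatten)) a b := by
        rw [pvGetE, List.getD_eq_getElem _ _ h1, List.getD_eq_getElem _ _ hb1]
      obtain ⟨-, hval⟩ := pv_univ ls (PySem.Set.ofList ls.flatten) h0 ha hb
      have e0 : pvGetE (List.replicate ls.length (List.replicate ls.length (0:Int))) a b = 0 := by
        unfold pvGetE
        rw [show (List.replicate ls.length (List.replicate ls.length (0:Int))).getD a []
              = List.replicate ls.length (0:Int) from by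
            rw [List.getD_eq_getElem _ _ (by simpa using ha)]; simp]
        rw [List.getD_eq_getElem _ _ (by simpa using hb)]
        simp
      rw [e1, hval, e0, zero_add, pv_count ls ha hb]
      simp [pvM, List.getElem_map, ha, hb]

-- ===== VERDICT (by name: the statement is the Claim_ definition above) =====
theorem cal_matrix_spec : Claim_equal_cal_matrix := by
  intro ls _
  unfold Spec_cal_matrix
  rw [cal_matrix_eq_pvM, cal_matrix_alt_eq_pvM]
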